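-- pv_equiv track=rewrite | github.com/lunchRamen/coding_test | Programmers/단어퍼즐.py | solution
-- ===== SOURCE A (Python) =====
-- def solution(strs, t):
--     n = len(t)
--     dp = [0] * (n + 1)
--     strs = set(strs)  # set을 사용하면 탐색할 때 시간복잡도 O(1)
--
--     #범위가 0~n이 아니라,1~n+1이다.
--     #왜냐하면, t를 슬라이싱할때, i가 마지막에 와야하기때문에
--     #파이썬의 문자열,리스트 슬라이싱은 마지막 idx-1이여서 i를 1부터 둔다.
--     for i in range(1,n+1):
--         dp[i] = len(t)+1  # i번째 시작시 최댓값으로 바꿔줌(최솟값 비교를 위해)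
--         #strs에 들어있는 문자의 길이는 1~5까지라서.
--         for k in range(1,6):
--             # 인덱스 범위 때문에..
--             #1개~5개를 다 조사할건데, 만약 k가 i보다 크면,
--             #인덱스 초과 에러가 뜨니까, s(시작)을 0으로 둠
--             if i - k < 0:
--                 s = 0
--             #아니라면 t의 i번째-k를 문자의 시작으로 둔다.
--             else:
--                 s = i - k
--             #그리고 s~i-1까지의 부분문자열이 strs배열에 있는지 검색.
--             if t[s:i] in strs:
--                 #있다면, dp[i]를 현재 값과
--                 #dp[i-k](t[s:i]를 썼을때, i-k번째까지 사용했던 부분문자열의 갯수 +t[s:i] 1개)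
--                 #를 비교해서 작은 값을 넣어준다. 이건 t의 index가 한칸씩 움직일때마다
--                 #매번 k를 1~5까지 검색하기때문에 해당 부분문자열의 길이기 1~5까지 중
--                 #가장 짧은 부분문자열의 합이 dp[i]에 저장되게 된다.
--                 dp[i] = min(dp[i], dp[i - k] + 1)
--     #이렇게 2중 for문을 돌면서 dp[n]엔 t의 길이를 만드는데 필요한
--     #strs의 갯수의 최솟값이 들어간다. 만약 이게 len(t)+1이라면 갱신된게
--     #없으므로 -1 있다면 그걸 answer에 넣어주면 됨.
--     if dp[-1] == len(t)+1:
--         answer = -1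
--     else:
--         answer = dp[-1]
--
--     return answer
-- ===== SOURCE B (Python) =====
-- def solution(strs, t):
--     # BFS over positions 0..len(t): edge i -> i+k (1<=k<=5) iff t[i:i+k] in strs;
--     # the answer is the BFS distance from 0 to len(t), or -1 if unreachable.
--     n = len(t)
--     words = set(strs)
--     frontier = {0}
--     visited = {0}
--     for d in range(n + 1):
--         if n in frontier:
--             return d
--         nxt = set()
--         for i in frontier:
--             for k in range(1, 6):
--                 j = i + k
--                 if j <= n and j not in visited and t[i:j] in words:
--                     nxt.add(j)
--         visited |= nxt
--         frontier = nxt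
--     return -1
-- ===== Notes on version B (the rewrite author's own statement) =====
-- stated objective: alternative
-- what changed: Replaces the forward DP array (dp[i] = min over the last-piece length k of dp[i-k]+1, with a len(t)+1 sentinel and Python negative-index reads) by a breadth-first search over positions 0..len(t) with frontier/visited sets, returning the first layer that reaches len(t); Pre_ excludes the inputs (len(t) in {1,2} with t[:1] in strs) on which A raises IndexError.
import Mathlib
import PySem

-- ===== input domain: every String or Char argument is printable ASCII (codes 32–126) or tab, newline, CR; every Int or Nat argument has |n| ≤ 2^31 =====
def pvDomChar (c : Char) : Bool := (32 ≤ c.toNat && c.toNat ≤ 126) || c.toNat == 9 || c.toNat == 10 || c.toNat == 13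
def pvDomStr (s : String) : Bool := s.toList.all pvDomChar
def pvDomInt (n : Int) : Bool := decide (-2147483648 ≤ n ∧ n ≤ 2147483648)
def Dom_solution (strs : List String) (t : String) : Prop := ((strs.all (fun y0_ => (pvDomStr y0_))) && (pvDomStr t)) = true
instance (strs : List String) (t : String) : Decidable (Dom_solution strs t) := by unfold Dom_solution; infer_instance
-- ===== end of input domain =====

-- B replaces A's forward DP array (sentinel len(t)+1, negative-index reads) by a BFS over
-- positions 0..len(t); equal return values are proved on Pre_ (A raises IndexError outside it).

-- ===== PORT A =====
def solution (strs : List String) (t : String) : Int :=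
  let n : Int := PySem.Str.len t
  let dp : List Int := PySem.List.pyRepeat [0] (n + 1)
  let strsSet : PySem.Set String := PySem.Set.ofList strs
  let dp :=
    (PySem.List.pyRange 1 (n + 1)).foldl (fun dp i =>
      let dp := PySem.List.pySetD dp i (PySem.Str.len t + 1)
      (PySem.List.pyRange 1 6).foldl (fun dp k =>
        let s : Int := if i - k < 0 then 0 else i - k
        if PySem.Set.contains strsSet (PySem.Str.slice t (some s) (some i)) then
          PySem.List.pySetD dp i
            (min (PySem.List.pyGetD dp i 0) (PySem.List.pyGetD dp (i - k) 0 + 1))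
        else dp) dp) dp
  if PySem.List.pyGetD dp (-1) 0 = PySem.Str.len t + 1 then -1
  else PySem.List.pyGetD dp (-1) 0

-- ===== PORT B =====
def solution_alt (strs : List String) (t : String) : Int :=
  let n : Int := PySem.Str.len t
  let words : PySem.Set String := PySem.Set.ofList strs
  let st :=
    (PySem.List.pyRange 0 (n + 1)).foldl
      (fun st d =>
        match st.2.2 with
        | some _ => st
        | none =>
          let fr := st.1
          let vis := st.2.1
          if PySem.Set.contains fr n then (fr, vis, some d)
          else
            let nxt : PySem.Set Int :=
              fr.foldl (fun nxt i =>
                (PySem.List.pyRange 1 6).foldl (fun nxt k =>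
                  let j := i + k
                  if decide (j ≤ n) && !(PySem.Set.contains vis j) &&
                      PySem.Set.contains words (PySem.Str.slice t (some i) (some j)) then
                    PySem.Set.add nxt j
                  else nxt) nxt) PySem.Set.empty
            (nxt, PySem.Set.union vis nxt, (none : Option Int)))
      (PySem.Set.ofList [0], PySem.Set.ofList [0], (none : Option Int))
  match st.2.2 with
  | some d => d
  | none => -1

-- ===== PRECONDITION & SPEC =====
-- Pre_ excludes exactly the inputs on which Python A raises IndexError: len(t) ∈ {1,2}
-- with the one-character prefix t[:1] in strs (dp[i-k] is then read past the front of dp).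
def Pre_solution (strs : List String) (t : String) : Prop :=
  ¬((PySem.Str.len t = 1 ∨ PySem.Str.len t = 2) ∧ PySem.Str.slice t (some 0) (some 1) ∈ strs)
instance (strs : List String) (t : String) : Decidable (Pre_solution strs t) := by
  unfold Pre_solution; infer_instance

def pvWitness_solution : List String × String := (["ba", "na", "n"], "banana")

def Spec_solution (strs : List String) (t : String) (out : Int) : Prop := out = solution_alt strs t
instance (strs : List String) (t : String) (out : Int) : Decidable (Spec_solution strs t out) := by
  unfold Spec_solution; infer_instance

-- ===== CLAIM (what is proved, stated in full; the proofs are below) =====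
def Claim_equal_solution : Prop := ∀ (strs : List String) (t : String), Dom_solution strs t → Pre_solution strs t → Spec_solution strs t (solution strs t)

-- ===== LEMMAS AND PROOFS =====

-- `pvW strs t a b` = the membership test `t[a:b] in set(strs)` both programs perform.
def pvW (strs : List String) (t : String) (a b : ℕ) : Bool :=
  PySem.Set.contains (PySem.Set.ofList strs) (PySem.Str.slice t (some (a : Int)) (some (b : Int)))

-- `pvMd strs t n j` = the minimal number of pieces (lengths 1..5, each in strs) composing
-- t[0:j], capped at n+1 (n+1 = unreachable), by the standard last-piece recursion.
def pvMd (strs : List String) (t : String) (n : ℕ) : ℕ → ℕ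
  | 0 => 0
  | j + 1 =>
    ((List.range (min 5 (j + 1))).filterMap (fun k' =>
        if pvW strs t (j - k') (j + 1) then some (pvMd strs t n (j - k') + 1) else none)).foldl
      min (n + 1)
decreasing_by omega

-- value of A's inner loop after the first c of the five k-steps
def pvVal (strs : List String) (t : String) (n i c : ℕ) : ℕ :=
  ((List.range (min c i)).filterMap (fun k' =>
      if pvW strs t (i - (k' + 1)) i then some (pvMd strs t n (i - (k' + 1)) + 1) else none)).foldl
    min (n + 1)

-- the common value both ports are shown to return
def pvRes (strs : List String) (t : String) : Int :=
  if pvMd strs t t.toList.length t.toList.length = t.toList.length + 1 then -1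
  else (pvMd strs t t.toList.length t.toList.length : Int)

-- ---- small fold-min facts ----
lemma pvFoldlMin_le_init (l : List ℕ) (a : ℕ) : l.foldl min a ≤ a := by
  induction l generalizing a with
  | nil => simp
  | cons x xs ih => exact le_trans (ih (min a x)) (min_le_left _ _)

lemma pvFoldlMin_le_mem (l : List ℕ) (a x : ℕ) (hx : x ∈ l) : l.foldl min a ≤ x := by
  induction l generalizing a with
  | nil => simp at hx
  | cons y ys ih =>
    rcases List.mem_cons.1 hx with rfl | h
    · exact le_trans (pvFoldlMin_le_init ys (min a x)) (min_le_right _ _)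
    · exact ih (min a y) h

lemma pvFoldlMin_eq_or_mem (l : List ℕ) (a : ℕ) : l.foldl min a = a ∨ l.foldl min a ∈ l := by
  induction l generalizing a with
  | nil => simp
  | cons x xs ih =>
    rcases ih (min a x) with h | h
    · rcases le_total a x with hax | hax
      · left; simp only [List.foldl_cons]; rw [h, min_eq_left hax]
      · right; simp only [List.foldl_cons]; rw [h, min_eq_right hax]; exact List.mem_cons_self
    · right; exact List.mem_cons_of_mem _ h

lemma pvMd_succ (strs : List String) (t : String) (n j : ℕ) :
    pvMd strs t n (j + 1) = pvVal strs t n (j + 1) 5 := by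
  rw [pvMd, pvVal]
  simp [Nat.succ_sub_succ]

lemma pvMd_le_cap (strs : List String) (t : String) (n j : ℕ) : pvMd strs t n j ≤ n + 1 := by
  cases j with
  | zero => simp [pvMd]
  | succ j => rw [pvMd]; exact pvFoldlMin_le_init _ _

lemma pvMd_pos (strs : List String) (t : String) (n j : ℕ) (hj : 1 ≤ j) :
    1 ≤ pvMd strs t n j := by
  obtain ⟨j, rfl⟩ : ∃ j', j = j' + 1 := ⟨j - 1, by omega⟩
  rw [pvMd]
  rcases pvFoldlMin_eq_or_mem ((List.range (min 5 (j + 1))).filterMap (fun k' =>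
      if pvW strs t (j - k') (j + 1) then some (pvMd strs t n (j - k') + 1) else none)) (n + 1)
    with h | h
  · omega
  · rcases List.mem_filterMap.1 h with ⟨k', _, hval⟩
    by_cases hw : pvW strs t (j - k') (j + 1) = true <;> simp [hw] at hval
    omega

-- membership description of the candidate list of pvMd (j ≥ 1)
lemma pvMd_mem_iff (strs : List String) (t : String) (n j : ℕ) (x : ℕ) :
    (x ∈ (List.range (min 5 (j + 1))).filterMap (fun k' =>
        if pvW strs t (j - k') (j + 1) then some (pvMd strs t n (j - k') + 1) else none)) ↔
      ∃ k : ℕ, 1 ≤ k ∧ k ≤ 5 ∧ k ≤ j + 1 ∧ pvW strs t (j + 1 - k) (j + 1) = true ∧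
        x = pvMd strs t n (j + 1 - k) + 1 := by
  constructor
  · intro hx
    rcases List.mem_filterMap.1 hx with ⟨k', hk', hval⟩
    rw [List.mem_range] at hk'
    by_cases hw : pvW strs t (j - k') (j + 1) = true <;> simp [hw] at hval
    have hjk : j + 1 - (k' + 1) = j - k' := by omega
    exact ⟨k' + 1, by omega, by omega, by omega, by rw [hjk]; exact hw, by rw [hjk]; omega⟩
  · rintro ⟨k, h1, h5, hj1, hw, rfl⟩
    apply List.mem_filterMap.2
    refine ⟨k - 1, List.mem_range.2 (by omega), ?_⟩
    have hjk : j - (k - 1) = j + 1 - k := by omega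
    rw [hjk, if_pos hw]

lemma pvMd_edge_le (strs : List String) (t : String) (n j k : ℕ) (h1 : 1 ≤ k) (h5 : k ≤ 5)
    (hj : k ≤ j) (hw : pvW strs t (j - k) j = true) :
    pvMd strs t n j ≤ pvMd strs t n (j - k) + 1 := by
  obtain ⟨j, rfl⟩ : ∃ j', j = j' + 1 := ⟨j - 1, by omega⟩
  rw [pvMd]
  exact pvFoldlMin_le_mem _ _ _ ((pvMd_mem_iff strs t n j _).2 ⟨k, h1, h5, hj, hw, rfl⟩)

lemma pvMd_pred (strs : List String) (t : String) (n j : ℕ) (hj : 1 ≤ j)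
    (hne : pvMd strs t n j ≠ n + 1) :
    ∃ k : ℕ, 1 ≤ k ∧ k ≤ 5 ∧ k ≤ j ∧ pvW strs t (j - k) j = true ∧
      pvMd strs t n j = pvMd strs t n (j - k) + 1 := by
  obtain ⟨j, rfl⟩ : ∃ j', j = j' + 1 := ⟨j - 1, by omega⟩
  rw [pvMd] at hne ⊢
  rcases pvFoldlMin_eq_or_mem ((List.range (min 5 (j + 1))).filterMap (fun k' =>
      if pvW strs t (j - k') (j + 1) then some (pvMd strs t n (j - k') + 1) else none)) (n + 1)
    with h | h
  · exact absurd h hne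
  · rcases (pvMd_mem_iff strs t n j _).1 h with ⟨k, h1, h5, hj1, hw, hx⟩
    exact ⟨k, h1, h5, hj1, hw, hx⟩

-- ---- A-side: the DP fold keeps dp[j] = pvMd j for processed j, 0 beyond ----
def pvDpInv (strs : List String) (t : String) (n m : ℕ) (dp : List Int) : Prop :=
  dp.length = n + 1 ∧
    ∀ j : ℕ, j < n + 1 → dp.getD j 0 = if j ≤ m then (pvMd strs t n j : Int) else 0

def pvKStepA (strs : List String) (t : String) (i : Int) (dp : List Int) (k : Int) :
    List Int :=
  if PySem.Set.contains (PySem.Set.ofList strs)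
      (PySem.Str.slice t (some (if i - k < 0 then 0 else i - k)) (some i)) then
    PySem.List.pySetD dp i
      (min (PySem.List.pyGetD dp i 0) (PySem.List.pyGetD dp (i - k) 0 + 1))
  else dp

def pvBodyA (strs : List String) (t : String) (dp : List Int) (i : Int) : List Int :=
  (PySem.List.pyRange 1 6).foldl (pvKStepA strs t i)
    (PySem.List.pySetD dp i (PySem.Str.len t + 1))

lemma pvSolution_eq (strs : List String) (t : String) :
    solution strs t =
      (let dp := (PySem.List.pyRange 1 (PySem.Str.len t + 1)).foldl (pvBodyA strs t)
          (PySem.List.pyRepeat [0] (PySem.Str.len t + 1));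
       if PySem.List.pyGetD dp (-1) 0 = PySem.Str.len t + 1 then -1
       else PySem.List.pyGetD dp (-1) 0) := rfl

lemma pvGetD_nonneg (xs : List Int) (i : Int) (h : ∀ y ∈ xs, 0 ≤ y) :
    0 ≤ PySem.List.pyGetD xs i 0 := by
  rcases hg : PySem.List.pyGet? xs i with _ | y
  · simp [PySem.List.pyGetD, hg]
  · have := h y (PySem.List.mem_of_pyGet?_eq_some xs hg)
    simp [PySem.List.pyGetD, hg, this]

lemma pvGetD_set_ne (l : List Int) (i j : ℕ) (v : Int) (h : j ≠ i) :
    (l.set i v).getD j 0 = l.getD j 0 := by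
  by_cases hj : j < l.length
  · rw [List.getD_eq_getElem _ _ (by simpa using hj), List.getD_eq_getElem _ _ hj]
    exact List.getElem_set_ne (by omega) _
  · have h1 : l.length ≤ j := by omega
    rw [List.getD_eq_default _ _ h1, List.getD_eq_default _ _ (by simpa using h1)]

lemma pvDpInv_nonneg (strs : List String) (t : String) (n m : ℕ) (dp : List Int)
    (hinv : pvDpInv strs t n m dp) : ∀ y ∈ dp, 0 ≤ y := by
  intro y hy
  rcases List.mem_iff_getElem.1 hy with ⟨j, hj, rfl⟩
  have hl := hinv.1
  have := hinv.2 j (by omega)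
  rw [List.getD_eq_getElem dp 0 hj] at this
  rw [this]
  split <;> omega

lemma pvVal_zero (strs : List String) (t : String) (n i : ℕ) :
    pvVal strs t n i 0 = n + 1 := by simp [pvVal]

lemma pvVal_succ_le (strs : List String) (t : String) (n i c : ℕ) (hci : c + 1 ≤ i) :
    pvVal strs t n i (c + 1) =
      if pvW strs t (i - (c + 1)) i then
        min (pvVal strs t n i c) (pvMd strs t n (i - (c + 1)) + 1)
      else pvVal strs t n i c := by
  have h1 : min (c + 1) i = c + 1 := by omega
  have h2 : min c i = c := by omega
  rw [pvVal, pvVal, h1, h2, List.range_succ, List.filterMap_append, List.foldl_append]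
  by_cases hw : pvW strs t (i - (c + 1)) i = true
  · simp [hw, List.foldl]
  · simp [hw]

lemma pvVal_succ_gt (strs : List String) (t : String) (n i c : ℕ) (hci : i ≤ c) :
    pvVal strs t n i (c + 1) = pvVal strs t n i c := by
  have h1 : min (c + 1) i = i := by omega
  have h2 : min c i = i := by omega
  rw [pvVal, pvVal, h1, h2]

lemma pvVal_le_one (strs : List String) (t : String) (n i c : ℕ) (hi : 1 ≤ i) (hic : i ≤ c)
    (hw : pvW strs t 0 i = true) : pvVal strs t n i c ≤ 1 := by
  have hmem : (1 : ℕ) ∈ (List.range (min c i)).filterMap (fun k' =>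
      if pvW strs t (i - (k' + 1)) i then some (pvMd strs t n (i - (k' + 1)) + 1) else none) := by
    apply List.mem_filterMap.2
    refine ⟨i - 1, List.mem_range.2 (by omega), ?_⟩
    have h0 : i - (i - 1 + 1) = 0 := by omega
    rw [h0, if_pos hw]
    simp [pvMd]
  exact pvFoldlMin_le_mem _ _ _ hmem

lemma pvKStep_eq (strs : List String) (t : String) (n : ℕ) (dp : List Int)
    (hlen : dp.length = n + 1)
    (hpos : ∀ y ∈ dp, 0 ≤ y)
    (i c : ℕ) (hi : 1 ≤ i) (hin : i ≤ n) (hc : c < 5)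
    (hmd : ∀ j : ℕ, j < i → dp.getD j 0 = (pvMd strs t n j : Int)) :
    pvKStepA strs t i (dp.set i (pvVal strs t n i c)) (((c : ℕ) : Int) + 1) =
      dp.set i (pvVal strs t n i (c + 1)) := by
  have hgetv :
      PySem.List.pyGetD (dp.set i ((pvVal strs t n i c : ℕ) : Int)) ((i : ℕ) : Int) 0 =
        ((pvVal strs t n i c : ℕ) : Int) := by
    rw [PySem.List.pyGetD_natCast, List.getD_eq_getElem _ _ (by simp [hlen]; omega)]
    exact List.getElem_set_self _
  by_cases hci : c + 1 ≤ i
  · -- no negative index: s = i - (c+1)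
    have hS : (if ((i : ℕ) : Int) - (((c : ℕ) : Int) + 1) < 0 then 0
        else ((i : ℕ) : Int) - (((c : ℕ) : Int) + 1)) = ((i - (c + 1) : ℕ) : Int) := by
      rw [if_neg (by omega)]
      omega
    rw [pvKStepA, hS]
    have hgetprev :
        PySem.List.pyGetD (dp.set i ((pvVal strs t n i c : ℕ) : Int))
            (((i : ℕ) : Int) - (((c : ℕ) : Int) + 1)) 0 =
          ((pvMd strs t n (i - (c + 1)) : ℕ) : Int) := by
      have hidx : ((i : ℕ) : Int) - (((c : ℕ) : Int) + 1) = ((i - (c + 1) : ℕ) : Int) := by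
        omega
      rw [hidx, PySem.List.pyGetD_natCast, pvGetD_set_ne _ _ _ _ (by omega),
        hmd (i - (c + 1)) (by omega)]
    by_cases hw : pvW strs t (i - (c + 1)) i = true
    · rw [pvW] at hw
      rw [if_pos hw, hgetv, hgetprev, PySem.List.pySetD_natCast, List.set_set,
        pvVal_succ_le strs t n i c hci, if_pos (by rw [pvW]; exact hw)]
      push_cast [Nat.cast_min]
      ring_nf
    · have hw2 := hw
      rw [pvW] at hw
      rw [if_neg hw, pvVal_succ_le strs t n i c hci, if_neg hw2]
  · -- wrap: s = 0, the update is a no-op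
    have hS : (if ((i : ℕ) : Int) - (((c : ℕ) : Int) + 1) < 0 then 0
        else ((i : ℕ) : Int) - (((c : ℕ) : Int) + 1)) = ((0 : ℕ) : Int) := by
      rw [if_pos (by omega)]
      norm_num
    rw [pvKStepA, hS]
    rw [pvVal_succ_gt strs t n i c (by omega)]
    by_cases hw : pvW strs t 0 i = true
    · rw [pvW] at hw
      rw [if_pos hw, hgetv, PySem.List.pySetD_natCast, List.set_set]
      have hge : 0 ≤ PySem.List.pyGetD (dp.set i ((pvVal strs t n i c : ℕ) : Int))
          (((i : ℕ) : Int) - (((c : ℕ) : Int) + 1)) 0 := by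
        apply pvGetD_nonneg
        intro y hy
        rcases List.mem_or_eq_of_mem_set hy with h | rfl
        · exact hpos y h
        · positivity
      have hle : ((pvVal strs t n i c : ℕ) : Int) ≤
          PySem.List.pyGetD (dp.set i ((pvVal strs t n i c : ℕ) : Int))
            (((i : ℕ) : Int) - (((c : ℕ) : Int) + 1)) 0 + 1 := by
        have := pvVal_le_one strs t n i c hi (by omega) (by rw [pvW]; exact hw)
        omega
      rw [min_eq_left hle]
    · rw [pvW] at hw
      rw [if_neg hw]

lemma pvInner (strs : List String) (t : String) (n : ℕ) (dp : List Int)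
    (hlen : dp.length = n + 1)
    (hpos : ∀ y ∈ dp, 0 ≤ y)
    (i : ℕ) (hi : 1 ≤ i) (hin : i ≤ n)
    (hmd : ∀ j : ℕ, j < i → dp.getD j 0 = (pvMd strs t n j : Int)) :
    ∀ f c : ℕ, 5 - c = f → c ≤ 5 →
      (PySem.List.pyRange (((c : ℕ) : Int) + 1) 6).foldl (pvKStepA strs t i)
          (dp.set i (pvVal strs t n i c)) =
        dp.set i ((pvMd strs t n i : ℕ) : Int) := by
  intro f
  induction f with
  | zero =>
    intro c hf hc
    have hc5 : c = 5 := by omega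
    subst hc5
    rw [PySem.List.pyRange_one_eq_nil (by norm_num)]
    obtain ⟨j, rfl⟩ : ∃ j', i = j' + 1 := ⟨i - 1, by omega⟩
    rw [List.foldl_nil, pvMd_succ]
  | succ f ih =>
    intro c hf hc
    have hlt : c < 5 := by omega
    rw [PySem.List.pyRange_one_cons (by omega), List.foldl_cons,
      pvKStep_eq strs t n dp hlen hpos i c hi hin hlt hmd]
    have hcast : ((c : ℕ) : Int) + 1 + 1 = (((c + 1 : ℕ) : ℕ) : Int) + 1 := by push_cast; ring
    rw [hcast]
    exact ih (c + 1) (by omega) (by omega)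

lemma pvBody_eq (strs : List String) (t : String) (dp : List Int) (i : ℕ) (hi : 1 ≤ i)
    (hin : i ≤ t.toList.length) (hinv : pvDpInv strs t t.toList.length (i - 1) dp) :
    pvBodyA strs t dp ((i : ℕ) : Int) =
      dp.set i ((pvMd strs t t.toList.length i : ℕ) : Int) := by
  set n := t.toList.length with hn
  have hlen := hinv.1
  have hcap : PySem.Str.len t + 1 = ((n + 1 : ℕ) : Int) := by
    rw [PySem.Str.len_eq]; push_cast; ring
  have hmd : ∀ j : ℕ, j < i → dp.getD j 0 = (pvMd strs t n j : Int) := by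
    intro j hj
    rw [hinv.2 j (by omega), if_pos (by omega)]
  have hpos := pvDpInv_nonneg strs t n (i - 1) dp hinv
  rw [pvBodyA, hcap, PySem.List.pySetD_natCast]
  have h0 : dp.set i ((n + 1 : ℕ) : Int) = dp.set i ((pvVal strs t n i 0 : ℕ) : Int) := by
    rw [pvVal_zero]
  rw [h0]
  have := pvInner strs t n dp hlen hpos i hi hin hmd 5 0 (by omega) (by omega)
  simpa using this

lemma pvDpInv_set (strs : List String) (t : String) (n i : ℕ) (dp : List Int) (hi : 1 ≤ i)
    (hin : i ≤ n) (hinv : pvDpInv strs t n (i - 1) dp) :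
    pvDpInv strs t n i (dp.set i ((pvMd strs t n i : ℕ) : Int)) := by
  refine ⟨by simp [hinv.1], ?_⟩
  intro j hj
  by_cases hji : j = i
  · subst hji
    rw [List.getD_eq_getElem _ _ (by rw [List.length_set, hinv.1]; omega),
      List.getElem_set_self, if_pos (le_refl j)]
  · rw [pvGetD_set_ne _ _ _ _ (by omega), hinv.2 j hj]
    split_ifs with h1 h2 h2 <;> first | rfl | omega

lemma pvOuter (strs : List String) (t : String) (m : ℕ) (hm : m ≤ t.toList.length) :
    pvDpInv strs t t.toList.length m
      ((PySem.List.pyRange 1 (((m : ℕ) : Int) + 1)).foldl (pvBodyA strs t)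
        (PySem.List.pyRepeat [0] (((t.toList.length : ℕ) : Int) + 1))) := by
  set n := t.toList.length with hn
  induction m with
  | zero =>
    rw [PySem.List.pyRange_one_eq_nil (by norm_num), List.foldl_nil]
    have htn : (((n : ℕ) : Int) + 1).toNat = n + 1 := by omega
    constructor
    · rw [PySem.List.pyRepeat_singleton, List.length_replicate, htn]
    · intro j hj
      rw [PySem.List.pyRepeat_singleton]
      have hjlen : j < ((((n : ℕ) : Int) + 1).toNat) := by omega
      rw [List.getD_eq_getElem _ _ (by simpa using hjlen), List.getElem_replicate]
      split_ifs with h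
      · have : j = 0 := by omega
        subst this
        simp [pvMd]
      · rfl
  | succ m ih =>
    have ih' := ih (by omega)
    have hsplit : PySem.List.pyRange 1 (((m + 1 : ℕ) : Int) + 1) =
        PySem.List.pyRange 1 (((m : ℕ) : Int) + 1) ++ [((m : ℕ) : Int) + 1] := by
      have : (((m + 1 : ℕ) : Int) + 1) = (((m : ℕ) : Int) + 1) + 1 := by push_cast; ring
      rw [this, PySem.List.pyRange_one_succ_right (by omega)]
    rw [hsplit, List.foldl_append, List.foldl_cons, List.foldl_nil]
    have hcast : ((m : ℕ) : Int) + 1 = (((m + 1 : ℕ) : ℕ) : Int) := by push_cast; ring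
    rw [hcast, pvBody_eq strs t _ (m + 1) (by omega) (by omega) (by simpa using ih')]
    exact pvDpInv_set strs t n (m + 1) _ (by omega) (by omega) (by simpa using ih')

lemma pvA_eq (strs : List String) (t : String) : solution strs t = pvRes strs t := by
  set n := t.toList.length with hn
  rw [pvSolution_eq]
  have hlen1 : PySem.Str.len t + 1 = ((n : ℕ) : Int) + 1 := by
    rw [PySem.Str.len_eq]
  simp only [hlen1]
  have hinv := pvOuter strs t n (le_refl n)
  set dp := (PySem.List.pyRange 1 (((n : ℕ) : Int) + 1)).foldl (pvBodyA strs t)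
      (PySem.List.pyRepeat [0] (((n : ℕ) : Int) + 1)) with hdp
  have hlen : dp.length = n + 1 := hinv.1
  have hlast : PySem.List.pyGetD dp (-1) 0 = ((pvMd strs t n n : ℕ) : Int) := by
    have h1 : PySem.List.pyGetD dp (-((1 : ℕ) : Int)) 0 = dp[dp.length - 1] :=
      PySem.List.pyGetD_neg_natCast dp 1 0 (by norm_num) (by omega)
    have h2 : (-((1 : ℕ) : Int)) = (-1 : Int) := by norm_num
    rw [h2] at h1
    rw [h1]
    have h3 : dp.length - 1 = n := by omega
    have h4 : dp[dp.length - 1] = dp.getD (dp.length - 1) 0 :=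
      (List.getD_eq_getElem _ _ (by omega)).symm
    rw [h4, h3, hinv.2 n (by omega), if_pos (le_refl n)]
  rw [hlast, pvRes]
  have hcast : (((pvMd strs t n n : ℕ) : Int) = ((n : ℕ) : Int) + 1) ↔
      pvMd strs t n n = n + 1 := by
    constructor
    · intro h; exact_mod_cast h
    · intro h; rw [h]; push_cast; ring
  split_ifs with h1 h2 h2
  · rfl
  · exact absurd (hcast.1 h1) h2
  · exact absurd (hcast.2 h2) h1
  · rfl

-- ---- B-side: BFS layers are the pvMd level sets ----
def pvCond (strs : List String) (t : String) (vis : List Int) (i k : Int) : Bool :=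
  decide (i + k ≤ PySem.Str.len t) && !(PySem.Set.contains vis (i + k)) &&
    PySem.Set.contains (PySem.Set.ofList strs) (PySem.Str.slice t (some i) (some (i + k)))

def pvBodyB (strs : List String) (t : String) (st : List Int × List Int × Option Int)
    (d : Int) : List Int × List Int × Option Int :=
  match st.2.2 with
  | some _ => st
  | none =>
    let fr := st.1
    let vis := st.2.1
    if PySem.Set.contains fr (PySem.Str.len t) then (fr, vis, some d)
    else
      let nxt : PySem.Set Int :=
        fr.foldl (fun nxt i =>
          (PySem.List.pyRange 1 6).foldl (fun nxt k =>
            if pvCond strs t vis i k then PySem.Set.add nxt (i + k) else nxt) nxt)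
          PySem.Set.empty
      (nxt, PySem.Set.union vis nxt, (none : Option Int))

lemma pvAlt_eq (strs : List String) (t : String) :
    solution_alt strs t =
      (match ((PySem.List.pyRange 0 (PySem.Str.len t + 1)).foldl (pvBodyB strs t)
          (PySem.Set.ofList [0], PySem.Set.ofList [0], (none : Option Int))).2.2 with
       | some d => d
       | none => -1) := rfl

lemma pvMem_foldl (g : PySem.Set Int → Int → PySem.Set Int) (P : Int → Int → Prop)
    (hg : ∀ acc i y, y ∈ g acc i ↔ y ∈ acc ∨ P i y) (l : List Int) (acc : PySem.Set Int)
    (y : Int) : y ∈ l.foldl g acc ↔ y ∈ acc ∨ ∃ i ∈ l, P i y := by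
  induction l generalizing acc with
  | nil => simp
  | cons x xs ih =>
    rw [List.foldl_cons, ih, hg]
    constructor
    · rintro (( h | h ) | ⟨i, hi, h⟩)
      · exact Or.inl h
      · exact Or.inr ⟨x, by simp, h⟩
      · exact Or.inr ⟨i, List.mem_cons_of_mem _ hi, h⟩
    · rintro (h | ⟨i, hi, h⟩)
      · exact Or.inl (Or.inl h)
      · rcases List.mem_cons.1 hi with rfl | hi
        · exact Or.inl (Or.inr h)
        · exact Or.inr ⟨i, hi, h⟩

lemma pvMem_inner (strs : List String) (t : String) (vis : List Int) (i : Int)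
    (acc : PySem.Set Int) (y : Int) :
    y ∈ (PySem.List.pyRange 1 6).foldl
        (fun nxt k => if pvCond strs t vis i k then PySem.Set.add nxt (i + k) else nxt) acc ↔
      y ∈ acc ∨ ∃ k : ℕ, 1 ≤ k ∧ k ≤ 5 ∧ pvCond strs t vis i ((k : ℕ) : Int) = true ∧
        y = i + ((k : ℕ) : Int) := by
  have hrange : PySem.List.pyRange 1 6 = [1, 2, 3, 4, 5] := by decide
  rw [pvMem_foldl (fun nxt k => if pvCond strs t vis i k then PySem.Set.add nxt (i + k) else nxt)
      (fun k y => pvCond strs t vis i k = true ∧ y = i + k) ?_ _ acc y]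
  · constructor
    · rintro (h | ⟨k, hk, hc, rfl⟩)
      · exact Or.inl h
      · rw [hrange] at hk
        fin_cases hk
        · exact Or.inr ⟨1, by norm_num, by norm_num, by norm_num [hc], by norm_num⟩
        · exact Or.inr ⟨2, by norm_num, by norm_num, by norm_num [hc], by norm_num⟩
        · exact Or.inr ⟨3, by norm_num, by norm_num, by norm_num [hc], by norm_num⟩
        · exact Or.inr ⟨4, by norm_num, by norm_num, by norm_num [hc], by norm_num⟩
        · exact Or.inr ⟨5, by norm_num, by norm_num, by norm_num [hc], by norm_num⟩
    · rintro (h | ⟨k, hk1, hk5, hc, rfl⟩)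
      · exact Or.inl h
      · refine Or.inr ⟨((k : ℕ) : Int), ?_, hc, rfl⟩
        rw [PySem.List.mem_pyRange_one]
        omega
  · intro acc j z
    by_cases hc : pvCond strs t vis i j = true
    · simp [hc, PySem.Set.mem_add]
    · simp [hc]

-- the BFS loop invariant, indexed by the number d of processed iterations
def pvInvB (strs : List String) (t : String) (n d : ℕ)
    (st : List Int × List Int × Option Int) : Prop :=
  (st.2.2 = none ∧
    (d ≤ n →
      ((∀ x : Int, x ∈ st.1 ↔ ∃ j : ℕ, j ≤ n ∧ pvMd strs t n j = d ∧ x = (j : Int)) ∧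
        (∀ x : Int, x ∈ st.2.1 ↔ ∃ j : ℕ, j ≤ n ∧ pvMd strs t n j ≤ d ∧ x = (j : Int)))) ∧
    (∀ d' : ℕ, d' < d → pvMd strs t n n ≠ d')) ∨
  (∃ d' : ℕ, d' < d ∧ st.2.2 = some ((d' : ℕ) : Int) ∧ pvMd strs t n n = d')

lemma pvNxt_char (strs : List String) (t : String) (n d : ℕ) (fr vis : List Int)
    (hn : n = t.toList.length)
    (hfr : ∀ x : Int, x ∈ fr ↔ ∃ j : ℕ, j ≤ n ∧ pvMd strs t n j = d ∧ x = (j : Int))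
    (hvis : ∀ x : Int, x ∈ vis ↔ ∃ j : ℕ, j ≤ n ∧ pvMd strs t n j ≤ d ∧ x = (j : Int))
    (hd : d + 1 ≤ n) (y : Int) :
    y ∈ fr.foldl (fun nxt i =>
        (PySem.List.pyRange 1 6).foldl
          (fun nxt k => if pvCond strs t vis i k then PySem.Set.add nxt (i + k) else nxt) nxt)
      PySem.Set.empty ↔
      ∃ j : ℕ, j ≤ n ∧ pvMd strs t n j = d + 1 ∧ y = (j : Int) := by
  have hlen : PySem.Str.len t = ((n : ℕ) : Int) := by rw [PySem.Str.len_eq, hn]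
  rw [pvMem_foldl _
      (fun i y => ∃ k : ℕ, 1 ≤ k ∧ k ≤ 5 ∧ pvCond strs t vis i ((k : ℕ) : Int) = true ∧
        y = i + ((k : ℕ) : Int))
      (fun acc i y => pvMem_inner strs t vis i acc y) fr PySem.Set.empty y]
  have hempty : y ∉ (PySem.Set.empty : PySem.Set Int) := by simp [PySem.Set.empty]
  constructor
  · rintro (h | ⟨i, hifr, k, hk1, hk5, hc, rfl⟩)
    · exact absurd h hempty
    · rcases (hfr i).1 hifr with ⟨a, han, hmda, rfl⟩
      rw [pvCond, Bool.and_eq_true, Bool.and_eq_true] at hc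
      obtain ⟨⟨hle, hnvis⟩, hw⟩ := hc
      have hcast : ((a : ℕ) : Int) + ((k : ℕ) : Int) = ((a + k : ℕ) : Int) := by push_cast; ring
      rw [hcast] at hle hnvis hw ⊢
      rw [hlen] at hle
      have hakn : a + k ≤ n := by exact_mod_cast of_decide_eq_true hle
      have hwk : pvW strs t a (a + k) = true := by rw [pvW]; exact hw
      have hnotvis : ¬ (pvMd strs t n (a + k) ≤ d) := by
        intro hmd
        have hmem : ((a + k : ℕ) : Int) ∈ vis := (hvis _).2 ⟨a + k, hakn, hmd, rfl⟩
        rw [← hcast] at hmem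
        simp at hnvis
        exact hnvis hmem
      have hub : pvMd strs t n (a + k) ≤ d + 1 := by
        have hsub : a + k - k = a := by omega
        have hedge := pvMd_edge_le strs t n (a + k) k hk1 hk5 (by omega)
          (by rw [hsub]; exact hwk)
        rw [hsub] at hedge
        omega
      exact ⟨a + k, hakn, by omega, rfl⟩
  · rintro ⟨j, hjn, hmdj, rfl⟩
    right
    have hj1 : 1 ≤ j := by
      by_contra h
      have : j = 0 := by omega
      subst this
      simp [pvMd] at hmdj
    rcases pvMd_pred strs t n j hj1 (by omega) with ⟨k, hk1, hk5, hkj, hw, heq⟩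
    have hmdpred : pvMd strs t n (j - k) = d := by omega
    refine ⟨((j - k : ℕ) : Int), (hfr _).2 ⟨j - k, by omega, hmdpred, rfl⟩,
      k, hk1, hk5, ?_, by omega⟩
    rw [pvCond, Bool.and_eq_true, Bool.and_eq_true]
    have hcast : ((j - k : ℕ) : Int) + ((k : ℕ) : Int) = ((j : ℕ) : Int) := by omega
    rw [hcast]
    refine ⟨⟨?_, ?_⟩, ?_⟩
    · rw [hlen]; exact decide_eq_true (by exact_mod_cast hjn)
    · have hnot : ((j : ℕ) : Int) ∉ vis := by
        intro hmem
        rcases (hvis _).1 hmem with ⟨j', hj'n, hmd', hj'⟩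
        have hj'' : j' = j := by exact_mod_cast hj'.symm
        rw [hj''] at hmd'
        omega
      rw [← PySem.Set.contains_iff vis ((j : ℕ) : Int)] at hnot
      simp at hnot ⊢
      exact hnot
    · rw [pvW] at hw
      exact hw

lemma pvStepB (strs : List String) (t : String) (n d : ℕ) (hn : n = t.toList.length)
    (st : List Int × List Int × Option Int) (hinv : pvInvB strs t n d st) (hd : d ≤ n) :
    pvInvB strs t n (d + 1) (pvBodyB strs t st ((d : ℕ) : Int)) := by
  obtain ⟨fr, vis, res⟩ := st
  have hlen : PySem.Str.len t = ((n : ℕ) : Int) := by rw [PySem.Str.len_eq, hn]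
  rcases hinv with ⟨hres, hchar, hnf⟩ | ⟨d', hd', hres, hmd⟩
  · have hres' : res = none := hres
    subst hres' 
    obtain ⟨hfr, hvis⟩ := hchar hd
    rw [pvBodyB]
    simp only
    by_cases hc : PySem.Set.contains fr (PySem.Str.len t) = true
    · -- found: pvMd n = d
      rw [if_pos hc]
      have : ((n : ℕ) : Int) ∈ fr := by
        rw [← PySem.Set.contains_iff, ← hlen]; exact hc
      rcases (hfr _).1 this with ⟨j, hjn, hmdj, hj⟩
      have : j = n := by exact_mod_cast hj.symm
      subst this
      exact Or.inr ⟨d, by omega, rfl, hmdj⟩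
    · rw [if_neg hc]
      left
      refine ⟨rfl, ?_, ?_⟩
      · intro hd1
        constructor
        · intro x
          exact pvNxt_char strs t n d fr vis hn hfr hvis hd1 x
        · intro x
          rw [PySem.Set.mem_union]
          rw [hvis x, pvNxt_char strs t n d fr vis hn hfr hvis hd1 x]
          constructor
          · rintro (⟨j, h1, h2, h3⟩ | ⟨j, h1, h2, h3⟩)
            · exact ⟨j, h1, by omega, h3⟩
            · exact ⟨j, h1, by omega, h3⟩
          · rintro ⟨j, h1, h2, h3⟩
            by_cases hle : pvMd strs t n j ≤ d
            · exact Or.inl ⟨j, h1, hle, h3⟩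
            · exact Or.inr ⟨j, h1, by omega, h3⟩
      · intro d' hd'
        by_cases hdd : d' = d
        · subst hdd
          intro hmdn
          apply hc
          rw [hlen, PySem.Set.contains_iff]
          exact (hfr _).2 ⟨n, le_refl n, hmdn, rfl⟩
        · exact hnf d' (by omega)
  · -- already found: the body is the identity
    have hres' : res = some ((d' : ℕ) : Int) := hres
    subst hres'
    exact Or.inr ⟨d', by omega, rfl, hmd⟩

lemma pvG_inv (strs : List String) (t : String) (n : ℕ) (hn : n = t.toList.length) :
    ∀ m : ℕ, m ≤ n + 1 →
      pvInvB strs t n m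
        ((PySem.List.pyRange 0 ((m : ℕ) : Int)).foldl (pvBodyB strs t)
          (PySem.Set.ofList [0], PySem.Set.ofList [0], (none : Option Int))) := by
  intro m
  induction m with
  | zero =>
    intro _
    rw [PySem.List.pyRange_one_eq_nil (by norm_num), List.foldl_nil]
    left
    refine ⟨rfl, ?_, by omega⟩
    intro _
    have h0 : (PySem.Set.ofList [(0 : Int)]) = [(0 : Int)] := by decide
    constructor <;> intro x <;> rw [h0] <;> simp only [List.mem_singleton] <;> constructor
    · rintro rfl
      exact ⟨0, by omega, by simp [pvMd], rfl⟩
    · rintro ⟨j, hjn, hmdj, rfl⟩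
      have : j = 0 := by
        by_contra h
        have := pvMd_pos strs t n j (by omega)
        omega
      simp [this]
    · rintro rfl
      exact ⟨0, by omega, by simp [pvMd], rfl⟩
    · rintro ⟨j, hjn, hmdj, rfl⟩
      have : j = 0 := by
        by_contra h
        have := pvMd_pos strs t n j (by omega)
        omega
      simp [this]
  | succ m ih =>
    intro hm
    have hsplit : PySem.List.pyRange 0 (((m + 1 : ℕ) : ℕ) : Int) =
        PySem.List.pyRange 0 ((m : ℕ) : Int) ++ [((m : ℕ) : Int)] := by
      have h1 : (((m + 1 : ℕ) : ℕ) : Int) = ((m : ℕ) : Int) + 1 := by push_cast; ring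
      rw [h1, PySem.List.pyRange_one_succ_right (by positivity)]
    rw [hsplit, List.foldl_append, List.foldl_cons, List.foldl_nil]
    exact pvStepB strs t n m hn _ (ih (by omega)) (by omega)

lemma pvB_eq (strs : List String) (t : String) : solution_alt strs t = pvRes strs t := by
  set n := t.toList.length with hn
  rw [pvAlt_eq]
  have hlen : PySem.Str.len t + 1 = (((n + 1 : ℕ) : ℕ) : Int) := by
    rw [PySem.Str.len_eq]; push_cast; ring
  rw [hlen]
  have hinv := pvG_inv strs t n hn (n + 1) (le_refl _)
  set st := (PySem.List.pyRange 0 (((n + 1 : ℕ) : ℕ) : Int)).foldl (pvBodyB strs t)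
      (PySem.Set.ofList [0], PySem.Set.ofList [0], (none : Option Int)) with hst
  rcases hinv with ⟨hres, _, hnf⟩ | ⟨d', _, hres, hmd⟩
  · rw [hres]
    have hcap : pvMd strs t n n = n + 1 := by
      have h1 := pvMd_le_cap strs t n n
      by_contra h
      exact hnf (pvMd strs t n n) (by omega) rfl
    rw [pvRes, if_pos hcap]
  · rw [hres]
    have hne : pvMd strs t n n ≠ n + 1 := by omega
    rw [pvRes, if_neg hne, hmd]

-- ===== VERDICT (by name: the statement is the Claim_ definition above) =====
theorem solution_spec : Claim_equal_solution := by
  intro strs t _ _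
  unfold Spec_solution
  rw [pvA_eq, pvB_eq]
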